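-- pv_equiv track=rewrite | github.com/PhilippChr/CONVINSE | convinse/question_understanding/structured_representation/dataset_structured_representation.py | output_to_text
-- ===== SOURCE A (Python) =====
-- def output_to_text(silver_SR, SR_delimiter):
--     """
--     Transform the given silver abstract representation to text.
--     The (recursive) list data structure is resolved and flattened.
--     """
--     sep = ", "
--     topic, entities, relation, ans_type = silver_SR[0]
--
--     # create individual components
--     topic = " ".join(topic).strip()
--     entities = " ".join(entities).strip()
--     relation = " ".join(relation).strip()
--     ans_type = ans_type.strip() if ans_type else ""
--
--     # create ar text
--     sr_text = f"{topic}{SR_delimiter}{entities}{SR_delimiter}{relation}{SR_delimiter}{ans_type}"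
--
--     # remove whitespaces in AR
--     while "  " in sr_text:
--         sr_text = sr_text.replace("  ", " ")
--     sr_text.replace(" , ", ", ")
--     sr_text = sr_text.strip()
--     return sr_text
-- ===== SOURCE B (Python) =====
-- def output_to_text(silver_SR, SR_delimiter):
--     """
--     Transform the given silver abstract representation to text.
--     Single-pass space squeeze instead of repeated whole-string replacement.
--     """
--     topic, entities, relation, ans_type = silver_SR[0]
--
--     fields = [
--         " ".join(topic).strip(),
--         " ".join(entities).strip(),
--         " ".join(relation).strip(),
--         ans_type.strip() if ans_type else "",
--     ]
--     sr_text = SR_delimiter.join(fields)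
--
--     # collapse runs of spaces in one pass
--     out = []
--     prev = None
--     for ch in sr_text:
--         if ch == ' ' and prev == ' ':
--             continue
--         out.append(ch)
--         prev = ch
--     return "".join(out).strip()
-- ===== Notes on version B (the rewrite author's own statement) =====
-- stated objective: alternative
-- what changed: A's repeated whole-string replace(' ',' ') while-loop is replaced by a single left-to-right pass that skips a space whenever the previously kept character was a space (and the f-string by a delimiter join).
-- outside the precondition, e.g. on output_to_text([], '|'): A raises IndexError, B raises IndexError
import Mathlib
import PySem

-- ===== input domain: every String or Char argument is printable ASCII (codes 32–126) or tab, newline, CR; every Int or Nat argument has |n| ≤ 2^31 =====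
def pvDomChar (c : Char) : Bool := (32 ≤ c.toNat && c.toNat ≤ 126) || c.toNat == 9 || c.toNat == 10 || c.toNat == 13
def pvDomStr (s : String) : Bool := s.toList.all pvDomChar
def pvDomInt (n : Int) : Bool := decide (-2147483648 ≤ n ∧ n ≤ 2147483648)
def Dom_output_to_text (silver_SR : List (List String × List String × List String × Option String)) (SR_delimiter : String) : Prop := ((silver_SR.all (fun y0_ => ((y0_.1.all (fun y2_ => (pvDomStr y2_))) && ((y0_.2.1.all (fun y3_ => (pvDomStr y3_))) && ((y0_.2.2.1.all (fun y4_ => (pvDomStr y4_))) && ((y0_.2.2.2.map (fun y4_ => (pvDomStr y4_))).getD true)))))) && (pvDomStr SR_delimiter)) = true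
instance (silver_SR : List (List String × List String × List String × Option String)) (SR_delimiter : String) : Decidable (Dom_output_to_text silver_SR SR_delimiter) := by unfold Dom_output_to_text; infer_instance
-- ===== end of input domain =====

-- B replaces A's repeated whole-string `replace("  ", " ")` loop by a single left-to-right pass
-- that skips a space whenever the previously kept character was a space (objective: alternative).

-- ===== PORT A =====
-- A-side helpers needed by port A's termination proof: `Rsp` is what ONE `s.replace("  ", " ")`
-- does (halve each run of spaces), and it shrinks the string whenever "  " occurs in it.
def Rsp : List Char → List Char
  | [] => []
  | [c] => [c]
  | a :: b :: t => if a = ' ' ∧ b = ' ' then ' ' :: Rsp t else a :: Rsp (b :: t)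

theorem replace_go_eq (fuel : Nat) : ∀ (l acc : List Char), l.length ≤ fuel →
    PySem.Chars.replace.go [' ', ' '] [' '] fuel l acc = acc.reverse ++ Rsp l := by
  induction fuel with
  | zero =>
    intro l acc h
    have hl : l = [] := List.eq_nil_of_length_eq_zero (Nat.le_zero.mp h)
    subst hl
    rw [PySem.Chars.replace.go.eq_def]
    simp [Rsp]
  | succ f ih =>
    intro l acc h
    match l with
    | [] =>
      rw [PySem.Chars.replace.go.eq_def]
      simp [Rsp]
    | [c] =>
      rw [PySem.Chars.replace.go.eq_def]
      have hpre : [' ', ' '].isPrefixOf [c] = false := by simp [List.isPrefixOf]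
      simp only [hpre, Bool.false_eq_true, if_false]
      rw [ih [] (c :: acc) (by simp)]
      simp [Rsp]
    | a :: b :: t =>
      rw [PySem.Chars.replace.go.eq_def]
      simp only [List.length_cons] at h
      by_cases hab : a = ' ' ∧ b = ' '
      · obtain ⟨ha, hb⟩ := hab
        subst ha; subst hb
        have hpre : [' ', ' '].isPrefixOf (' ' :: ' ' :: t) = true := by
          simp [List.isPrefixOf]
        simp only [hpre, if_true]
        rw [show List.drop [' ', ' '].length (' ' :: ' ' :: t) = t from rfl]
        rw [ih t _ (by omega)]
        simp [Rsp]
      · have hpre : [' ', ' '].isPrefixOf (a :: b :: t) = false := by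
          by_cases ha : a = ' '
          · by_cases hb : b = ' '
            · exact absurd ⟨ha, hb⟩ hab
            · have hb' : (' ' == b) = false := beq_eq_false_iff_ne.mpr (fun h => hb h.symm)
              simp [List.isPrefixOf, hb']
          · have ha' : (' ' == a) = false := beq_eq_false_iff_ne.mpr (fun h => ha h.symm)
            simp [List.isPrefixOf, ha']
        simp only [hpre, Bool.false_eq_true, if_false]
        rw [ih (b :: t) (a :: acc) (by simp only [List.length_cons]; omega)]
        simp [Rsp, if_neg hab]

theorem replace_eq_Rsp (l : List Char) :
    PySem.Chars.replace l [' ', ' '] [' '] = Rsp l := by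
  rw [PySem.Chars.replace]
  rw [if_neg (by simp)]
  rw [replace_go_eq l.length l [] (Nat.le_refl _)]
  simp

theorem Rsp_length_le (l : List Char) : (Rsp l).length ≤ l.length := by
  induction l using Rsp.induct with
  | case1 => simp [Rsp]
  | case2 c => simp [Rsp]
  | case3 a b t h ih =>
    simp only [Rsp, if_pos h, List.length_cons]; omega
  | case4 a b t h ih =>
    simp only [Rsp, if_neg h, List.length_cons] at *; omega

theorem Rsp_length_lt (l : List Char) (h : [' ', ' '] <:+: l) :
    (Rsp l).length < l.length := by
  induction l using Rsp.induct with
  | case1 => exact absurd h.length_le (by simp)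
  | case2 c => exact absurd h.length_le (by simp)
  | case3 a b t hab ih =>
    have := Rsp_length_le t
    simp only [Rsp, if_pos hab, List.length_cons]; omega
  | case4 a b t hab ih =>
    obtain ⟨u, v, huv⟩ := h
    have hin : [' ', ' '] <:+: (b :: t) := by
      match u, huv with
      | [], huv =>
        simp only [List.nil_append, List.cons_append, List.cons.injEq] at huv
        exact absurd ⟨huv.1.symm, huv.2.1.symm⟩ hab
      | x :: u', huv =>
        simp only [List.cons_append, List.cons.injEq] at huv
        exact ⟨u', v, huv.2⟩
    have := ih hin
    simp only [Rsp, if_neg hab, List.length_cons] at *; omega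

-- A's `while "  " in sr_text: sr_text = sr_text.replace("  ", " ")` loop.
def loopA (s : List Char) : List Char :=
  if h : PySem.Chars.isIn [' ', ' '] s = true then
    loopA (PySem.Chars.replace s [' ', ' '] [' '])
  else s
termination_by s.length
decreasing_by
  rw [replace_eq_Rsp]
  exact Rsp_length_lt s ((PySem.Chars.isIn_iff_infix [' ', ' '] s).mp h)

def output_to_text (silver_SR : List (List String × List String × List String × Option String)) (SR_delimiter : String) : String :=
  match silver_SR with
  | [] => ""  -- unreachable: Python raises IndexError on silver_SR[0]; excluded by Pre_
  | (topic, entities, relation, ans_type) :: _ =>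
    let topicC := PySem.Chars.strip (PySem.Chars.join [' '] (topic.map String.toList))
    let entitiesC := PySem.Chars.strip (PySem.Chars.join [' '] (entities.map String.toList))
    let relationC := PySem.Chars.strip (PySem.Chars.join [' '] (relation.map String.toList))
    let ansC := match ans_type with
      | none => []
      | some a => if a.toList.isEmpty then [] else PySem.Chars.strip a.toList
    let d := SR_delimiter.toList
    let sr_text := topicC ++ d ++ entitiesC ++ d ++ relationC ++ d ++ ansC
    String.ofList (PySem.Chars.strip (loopA sr_text))

-- ===== PORT B =====
-- B's loop body: skip a space whose previously kept character was a space.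
def pvStep (st : List Char × Option Char) (c : Char) : List Char × Option Char :=
  if c = ' ' ∧ st.2 = some ' ' then st else (c :: st.1, some c)

def output_to_text_alt (silver_SR : List (List String × List String × List String × Option String)) (SR_delimiter : String) : String :=
  match silver_SR with
  | [] => ""  -- unreachable under Pre_
  | (topic, entities, relation, ans_type) :: _ =>
    let fields := [PySem.Chars.strip (PySem.Chars.join [' '] (topic.map String.toList)),
                   PySem.Chars.strip (PySem.Chars.join [' '] (entities.map String.toList)),
                   PySem.Chars.strip (PySem.Chars.join [' '] (relation.map String.toList)),
                   match ans_type with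
                   | none => []
                   | some a => if a.toList.isEmpty then [] else PySem.Chars.strip a.toList]
    let sr_text := PySem.Chars.join SR_delimiter.toList fields
    let st := sr_text.foldl pvStep ([], none)
    String.ofList (PySem.Chars.strip st.1.reverse)

-- ===== PRECONDITION & SPEC =====
-- Python A evaluates silver_SR[0] and raises IndexError on the empty list; exactly that is excluded.
def Pre_output_to_text (silver_SR : List (List String × List String × List String × Option String)) (SR_delimiter : String) : Prop := silver_SR ≠ []
instance (silver_SR : List (List String × List String × List String × Option String)) (SR_delimiter : String) : Decidable (Pre_output_to_text silver_SR SR_delimiter) := by unfold Pre_output_to_text; infer_instance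

def pvWitness_output_to_text : (List (List String × List String × List String × Option String)) × String :=
  ([(["who", " played"], ["lily "], ["actor"], some " human ")], " || ")

def Spec_output_to_text (silver_SR : List (List String × List String × List String × Option String)) (SR_delimiter : String) (out : String) : Prop := out = output_to_text_alt silver_SR SR_delimiter
instance (silver_SR : List (List String × List String × List String × Option String)) (SR_delimiter : String) (out : String) : Decidable (Spec_output_to_text silver_SR SR_delimiter out) := by unfold Spec_output_to_text; infer_instance

-- ===== CLAIM (what is proved, stated in full; the proofs are below) =====
def Claim_equal_output_to_text : Prop := ∀ (silver_SR : List (List String × List String × List String × Option String)) (SR_delimiter : String), Dom_output_to_text silver_SR SR_delimiter → Pre_output_to_text silver_SR SR_delimiter → Spec_output_to_text silver_SR SR_delimiter (output_to_text silver_SR SR_delimiter)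

-- ===== LEMMAS AND PROOFS =====

-- `sqz` collapses every run of spaces to a single space: the common value of A's
-- replace-to-fixpoint loop and of B's single pass.
def sqz : List Char → List Char
  | [] => []
  | [c] => [c]
  | a :: b :: t => if a = ' ' ∧ b = ' ' then sqz (b :: t) else a :: sqz (b :: t)

theorem sqz_cons_ne (a : Char) (x : List Char) (ha : a ≠ ' ') : sqz (a :: x) = a :: sqz x := by
  match x with
  | [] => simp [sqz]
  | b :: t => rw [sqz, if_neg (fun h => ha h.1)]

theorem sqz_head (a : Char) (t : List Char) : ∃ u, sqz (a :: t) = a :: u := by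
  induction t generalizing a with
  | nil => exact ⟨[], rfl⟩
  | cons b t ih =>
    by_cases h : a = ' ' ∧ b = ' '
    · obtain ⟨ha, hb⟩ := h; subst ha; subst hb
      obtain ⟨u, hu⟩ := ih ' '
      exact ⟨u, by rw [sqz, if_pos ⟨rfl, rfl⟩]; exact hu⟩
    · exact ⟨sqz (b :: t), by rw [sqz, if_neg h]⟩

theorem sqz_cons_space (x : List Char) :
    sqz (' ' :: x) = if (sqz x).head? = some ' ' then sqz x else ' ' :: sqz x := by
  match x with
  | [] => simp [sqz]
  | b :: t =>
    by_cases hb : b = ' '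
    · subst hb
      obtain ⟨u, hu⟩ := sqz_head ' ' t
      rw [show sqz (' ' :: ' ' :: t) = sqz (' ' :: t) from by rw [sqz, if_pos ⟨rfl, rfl⟩]]
      rw [hu]; simp
    · obtain ⟨u, hu⟩ := sqz_head b t
      rw [show sqz (' ' :: b :: t) = ' ' :: sqz (b :: t) from by
        rw [sqz, if_neg (fun h => hb h.2)]]
      rw [hu]; simp [hb]

theorem sqz_cons_congr (a : Char) (x y : List Char) (h : sqz x = sqz y) :
    sqz (a :: x) = sqz (a :: y) := by
  by_cases ha : a = ' '
  · subst ha; rw [sqz_cons_space, sqz_cons_space, h]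
  · rw [sqz_cons_ne a x ha, sqz_cons_ne a y ha, h]

theorem sqz_Rsp (l : List Char) : sqz (Rsp l) = sqz l := by
  induction l using Rsp.induct with
  | case1 => rfl
  | case2 c => rfl
  | case3 a b t hab ih =>
    obtain ⟨ha, hb⟩ := hab; subst ha; subst hb
    rw [show Rsp (' ' :: ' ' :: t) = ' ' :: Rsp t from by rw [Rsp, if_pos ⟨rfl, rfl⟩]]
    rw [show sqz (' ' :: ' ' :: t) = sqz (' ' :: t) from by rw [sqz, if_pos ⟨rfl, rfl⟩]]
    exact sqz_cons_congr ' ' (Rsp t) t ih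
  | case4 a b t hab ih =>
    rw [show Rsp (a :: b :: t) = a :: Rsp (b :: t) from by rw [Rsp, if_neg hab]]
    exact sqz_cons_congr a (Rsp (b :: t)) (b :: t) ih

theorem sqz_of_not_infix (l : List Char) (h : ¬ ([' ', ' '] <:+: l)) : sqz l = l := by
  induction l using Rsp.induct with
  | case1 => rfl
  | case2 c => rfl
  | case3 a b t hab ih =>
    exact absurd ⟨[], t, by simp [hab.1, hab.2]⟩ h
  | case4 a b t hab ih =>
    have h' : ¬ ([' ', ' '] <:+: (b :: t)) := by
      intro hbt
      obtain ⟨u, v, huv⟩ := hbt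
      exact h ⟨a :: u, v, by rw [← huv]; rfl⟩
    rw [sqz, if_neg hab, ih h']

theorem loopA_eq_sqz (l : List Char) : loopA l = sqz l := by
  induction l using loopA.induct with
  | case1 s h ih =>
    rw [loopA, dif_pos h, ih, replace_eq_Rsp, sqz_Rsp]
  | case2 s h =>
    rw [loopA, dif_neg h]
    refine (sqz_of_not_infix s ?_).symm
    intro hin
    exact h ((PySem.Chars.isIn_iff_infix [' ', ' '] s).mpr hin)

-- B's fold, characterised: `gOut p l` is the output of B's pass when the previous kept character is `p`.
def gOut : Option Char → List Char → List Char
  | _, [] => []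
  | p, c :: t => if c = ' ' ∧ p = some ' ' then gOut (some ' ') t else c :: gOut (some c) t

theorem foldl_pvStep (l : List Char) : ∀ (r : List Char) (p : Option Char),
    (l.foldl pvStep (r, p)).1 = (gOut p l).reverse ++ r := by
  induction l with
  | nil => intro r p; simp [gOut]
  | cons c t ih =>
    intro r p
    by_cases h : c = ' ' ∧ p = some ' '
    · obtain ⟨hc, hp⟩ := h; subst hc; subst hp
      rw [List.foldl_cons, show pvStep (r, some ' ') ' ' = (r, some ' ') from by
        simp [pvStep]]
      rw [ih r (some ' ')]
      rw [show gOut (some ' ') (' ' :: t) = gOut (some ' ') t from by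
        rw [gOut, if_pos ⟨rfl, rfl⟩]]
    · rw [List.foldl_cons, show pvStep (r, p) c = (c :: r, some c) from by
        rw [pvStep, if_neg h]]
      rw [ih (c :: r) (some c)]
      rw [show gOut p (c :: t) = c :: gOut (some c) t from by rw [gOut, if_neg h]]
      simp

theorem gOut_sqz (l : List Char) :
    (∀ p, p ≠ some ' ' → gOut p l = sqz l) ∧ (' ' :: gOut (some ' ') l = sqz (' ' :: l)) := by
  induction l with
  | nil => exact ⟨fun p _ => rfl, rfl⟩
  | cons c t ih =>
    constructor
    · intro p hp
      rw [gOut, if_neg (fun h => hp h.2)]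
      by_cases hc : c = ' '
      · subst hc; exact ih.2
      · rw [sqz_cons_ne c t hc, ih.1 (some c) (by simp [hc])]
    · by_cases hc : c = ' '
      · subst hc
        rw [gOut, if_pos ⟨rfl, rfl⟩]
        rw [show sqz (' ' :: ' ' :: t) = sqz (' ' :: t) from by rw [sqz, if_pos ⟨rfl, rfl⟩]]
        exact ih.2
      · rw [gOut, if_neg (fun h => hc h.1)]
        rw [show sqz (' ' :: c :: t) = ' ' :: sqz (c :: t) from by
          rw [sqz, if_neg (fun h => hc h.2)]]
        rw [sqz_cons_ne c t hc, ih.1 (some c) (by simp [hc])]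

-- ===== VERDICT (by name: the statement is the Claim_ definition above) =====
theorem output_to_text_spec : Claim_equal_output_to_text := by
  intro silver_SR SR_delimiter _hdom hpre
  unfold Spec_output_to_text
  match silver_SR with
  | [] => exact absurd rfl hpre
  | (topic, entities, relation, ans_type) :: rest =>
    unfold output_to_text output_to_text_alt
    simp only []
    rw [foldl_pvStep, List.append_nil, List.reverse_reverse]
    rw [(gOut_sqz _).1 none (by simp), loopA_eq_sqz]
    congr 2
    rw [PySem.Chars.join_cons_cons, PySem.Chars.join_cons_cons, PySem.Chars.join_cons_cons]
    rw [show ∀ x : List Char, PySem.Chars.join SR_delimiter.toList [x] = x from fun x => by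
      simp [PySem.Chars.join, List.intercalate]]
    simp [List.append_assoc]
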